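-- pv_equiv track=rewrite | github.com/sivacharan93/Computer-Vison-OMR-Sheet-Auto-Grader | grade.py | box_index_finder
-- ===== SOURCE A (Python) =====
-- def box_index_finder(fun_l):
-- #As the last horizon axis(pixel position of the last set of question was in 2000 range and most of time,
-- #we are missing on this particular axis, we have imputed this with the help of already present lower most horizontal axis)
--     l = list(fun_l)
--     while l[-1][0] < 2000:
--         l.append((l[-2][0] + 45, l[-2][1]))
--
-- #creating two lists to accomadate unique horizontal and vertical cordinates of the boxes
-- #this lists will give the intial cordinates of all the boxes present in the sheet
--     x_unique = []
--     y_unique = []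
--
-- #adding a missing horizontal axis
-- #horizontal axis was considered missing by selecting top to down horizontal axis one by one seeing the difference between two consecutive axis
-- #if the difference if more than 70, then a line was added
--     i = 0
--     while i < len(l)-1:
--         if l[i+1][0] - l[i][0] > 70:
--             l.insert(i+1,(l[i][0]+45, l[i][1]))
--
-- #adding uniques horizontal, vertical cordinates to the list
--         x, y = l[i][0], l[i][1]
--
--         if x not in x_unique:
--             x_unique.append(x)
--         if y not in y_unique:
--             y_unique.append(y)
--         i +=1
--     if l[-1][0] not in x_unique:
--         x_unique.append(l[-1][0])
--     if l[-1][1] not in y_unique: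
--         y_unique.append(l[-1][1])
--
--     return x_unique, y_unique
-- ===== SOURCE B (Python) =====
-- def box_index_finder(fun_l):
--     # Phase 1: extend the list until the last x reaches 2000.
--     l = list(fun_l)
--     while l[-1][0] < 2000:
--         l.append((l[-2][0] + 45, l[-2][1]))
--
--     # Phase 2: build a fully expanded list, filling every large gap
--     # with synthetic points carrying the left point's y.
--     expanded = []
--     for j in range(len(l) - 1):
--         x, y = l[j]
--         expanded.append((x, y))
--         nx = l[j + 1][0]
--         while nx - x > 70:
--             x += 45
--             expanded.append((x, y))
--     expanded.append(l[-1])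
--
--     # Phase 3: collect the coordinates in first-appearance order.
--     x_unique = list(dict.fromkeys(p[0] for p in expanded))
--     y_unique = list(dict.fromkeys(p[1] for p in expanded))
--     return x_unique, y_unique
-- ===== Notes on version B (the rewrite author's own statement) =====
-- stated objective: faster
-- what changed: B replaces A's single interleaved while-loop that mutates the list in place with insert() and collects uniques via 'x not in x_unique' list scans by three separate passes: extend, build a fully expanded point list (inner gap-filling loop per consecutive pair), then dedup the x and y coordinates independently with dict.fromkeys, removing both the O(n) list inserts and the O(u) membership scans.
import Mathlib
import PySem

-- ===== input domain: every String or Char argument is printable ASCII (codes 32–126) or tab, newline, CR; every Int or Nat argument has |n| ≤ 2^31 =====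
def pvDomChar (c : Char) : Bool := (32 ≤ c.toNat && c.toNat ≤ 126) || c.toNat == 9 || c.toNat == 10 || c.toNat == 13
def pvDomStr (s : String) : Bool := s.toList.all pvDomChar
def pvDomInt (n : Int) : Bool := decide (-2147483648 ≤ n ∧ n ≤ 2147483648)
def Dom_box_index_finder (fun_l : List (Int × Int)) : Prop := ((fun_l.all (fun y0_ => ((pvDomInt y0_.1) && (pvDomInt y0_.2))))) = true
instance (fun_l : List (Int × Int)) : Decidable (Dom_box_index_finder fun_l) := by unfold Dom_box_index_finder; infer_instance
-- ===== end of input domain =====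

-- B restructures A's interleaved insert-and-collect loop into three separate passes
-- (extend, expand gaps, dedup each coordinate); return values proved equal on Pre_.

-- ===== PORT A =====

-- measure for the phase-1 while loop: (t(last)+t(second-last), t(last)) with t x = max(0, 2000-x)
def pvExtMeas (l : List (Int × Int)) : Nat × Nat :=
  let a := ((l.getLast?.map (fun p => (2000 - p.1).toNat)).getD 0)
  let b := ((l.dropLast.getLast?.map (fun p => (2000 - p.1).toNat)).getD 0)
  (a + b, a)

-- `while l[-1][0] < 2000: l.append((l[-2][0]+45, l[-2][1]))`; the `none` branches are
-- Python's IndexError on l[-1]/l[-2] (excluded by Pre_), where the port just stops.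
def pvExtendA (l : List (Int × Int)) : List (Int × Int) :=
  match h1 : l.getLast?, h2 : l.dropLast.getLast? with
  | some last, some sl =>
      if last.1 < 2000 then pvExtendA (l ++ [(sl.1 + 45, sl.2)]) else l
  | _, _ => l
termination_by pvExtMeas l
decreasing_by
  simp only [pvExtMeas, List.getLast?_concat, List.dropLast_concat, h1, h2, Option.map_some,
    Option.getD_some]
  rcases lt_or_ge sl.1 2000 with h' | h'
  · exact Prod.Lex.left _ _ (by omega)
  · have e : (2000 - (sl.1 + 45)).toNat + (2000 - last.1).toNat
        = (2000 - last.1).toNat + (2000 - sl.1).toNat := by omega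
    rw [e]
    exact Prod.Lex.right _ (by omega)

def pvAddUnique (xs : List Int) (x : Int) : List Int := if x ∈ xs then xs else xs ++ [x]

def pvHeadGap : List (Int × Int) → Nat
  | p :: q :: _ => (q.1 - p.1).toNat
  | _ => 0

-- the `while i < len(l)-1` loop with the in-place insert, as recursion on the suffix l[i:]
def pvLoopA : List (Int × Int) → List Int → List Int → List Int × List Int
  | [], xs, ys => (xs, ys)
  | [p], xs, ys => (pvAddUnique xs p.1, pvAddUnique ys p.2)
  | p :: q :: rest, xs, ys =>
      if q.1 - p.1 > 70 then
        pvLoopA ((p.1 + 45, p.2) :: q :: rest) (pvAddUnique xs p.1) (pvAddUnique ys p.2)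
      else
        pvLoopA (q :: rest) (pvAddUnique xs p.1) (pvAddUnique ys p.2)
termination_by l _ _ => (l.length, pvHeadGap l)
decreasing_by
  · simp only [pvHeadGap, List.length_cons]
    exact Prod.Lex.right _ (by omega)
  · exact Prod.Lex.left _ _ (by simp)

def box_index_finder (fun_l : List (Int × Int)) : List Int × List Int :=
  pvLoopA (pvExtendA fun_l) [] []

-- ===== PORT B =====

-- phase 1 of B is textually the same while loop as A's
def pvExtendB (l : List (Int × Int)) : List (Int × Int) :=
  match h1 : l.getLast?, h2 : l.dropLast.getLast? with
  | some last, some sl =>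
      if last.1 < 2000 then pvExtendB (l ++ [(sl.1 + 45, sl.2)]) else l
  | _, _ => l
termination_by pvExtMeas l
decreasing_by
  simp only [pvExtMeas, List.getLast?_concat, List.dropLast_concat, h1, h2, Option.map_some,
    Option.getD_some]
  rcases lt_or_ge sl.1 2000 with h' | h'
  · exact Prod.Lex.left _ _ (by omega)
  · have e : (2000 - (sl.1 + 45)).toNat + (2000 - last.1).toNat
        = (2000 - last.1).toNat + (2000 - sl.1).toNat := by omega
    rw [e]
    exact Prod.Lex.right _ (by omega)

-- `while nx - x > 70: x += 45; expanded.append((x, y))`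
def pvFillB (x nx y : Int) : List (Int × Int) :=
  if nx - x > 70 then (x + 45, y) :: pvFillB (x + 45) nx y else []
termination_by (nx - x).toNat
decreasing_by omega

-- `for j in range(len(l)-1): …` followed by `expanded.append(l[-1])`
def pvExpandB : List (Int × Int) → List (Int × Int)
  | [] => []
  | [p] => [p]
  | p :: q :: rest => (p :: pvFillB p.1 q.1 p.2) ++ pvExpandB (q :: rest)

-- `list(dict.fromkeys(…))`: first-appearance deduplication
def pvFirstAppear (zs : List Int) : List Int :=
  zs.foldl (fun acc x => if x ∈ acc then acc else acc ++ [x]) []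

def box_index_finder_alt (fun_l : List (Int × Int)) : List Int × List Int :=
  let l := pvExtendB fun_l
  let e := pvExpandB l
  (pvFirstAppear (e.map Prod.fst), pvFirstAppear (e.map Prod.snd))

-- ===== PRECONDITION & SPEC =====
-- Pre_ excludes exactly the inputs on which Python A raises IndexError: the empty list
-- (l[-1]), and a one-element list with x < 2000 (l[-2]).
def Pre_box_index_finder (fun_l : List (Int × Int)) : Prop :=
  fun_l ≠ [] ∧ (2 ≤ fun_l.length ∨ 2000 ≤ fun_l.headI.1)
instance (fun_l : List (Int × Int)) : Decidable (Pre_box_index_finder fun_l) := by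
  unfold Pre_box_index_finder; infer_instance

def pvWitness_box_index_finder : (List (Int × Int)) := [(1000, 5), (1955, 5)]

def Spec_box_index_finder (fun_l : List (Int × Int)) (out : List Int × List Int) : Prop := out = box_index_finder_alt fun_l
instance (fun_l : List (Int × Int)) (out : List Int × List Int) : Decidable (Spec_box_index_finder fun_l out) := by unfold Spec_box_index_finder; infer_instance

-- ===== CLAIM (what is proved, stated in full; the proofs are below) =====
def Claim_equal_box_index_finder : Prop := ∀ (fun_l : List (Int × Int)), Dom_box_index_finder fun_l → Pre_box_index_finder fun_l → Spec_box_index_finder fun_l (box_index_finder fun_l)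

-- ===== LEMMAS AND PROOFS =====

theorem pvExtendA_eq_pvExtendB (l : List (Int × Int)) : pvExtendA l = pvExtendB l := by
  fun_induction pvExtendA l with
  | case1 l last sl h1 h2 h ih =>
      rw [pvExtendB]
      split <;> simp_all
  | case2 l last sl h1 h2 h =>
      rw [pvExtendB]
      split <;> simp_all
  | case3 l h =>
      rw [pvExtendB]
      split <;> simp_all

theorem pvLoopA_eq_expand (l : List (Int × Int)) (xs ys : List Int) :
    pvLoopA l xs ys =
      (((pvExpandB l).map Prod.fst).foldl pvAddUnique xs,
       ((pvExpandB l).map Prod.snd).foldl pvAddUnique ys) := by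
  fun_induction pvLoopA l xs ys with
  | case1 xs ys => simp [pvExpandB]
  | case2 p xs ys => simp [pvExpandB]
  | case3 p q rest xs ys h ih =>
      have hfill : pvFillB p.1 q.1 p.2 = (p.1 + 45, p.2) :: pvFillB (p.1 + 45) q.1 p.2 := by
        rw [pvFillB]; simp [h]
      have hexp : pvExpandB (p :: q :: rest)
          = p :: pvExpandB ((p.1 + 45, p.2) :: q :: rest) := by
        simp [pvExpandB, hfill]
      rw [ih, hexp]
      simp
  | case4 p q rest xs ys h ih =>
      have hfill : pvFillB p.1 q.1 p.2 = [] := by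
        rw [pvFillB]; simp; omega
      have hexp : pvExpandB (p :: q :: rest) = p :: pvExpandB (q :: rest) := by
        simp [pvExpandB, hfill]
      rw [ih, hexp]
      simp

theorem pvFirstAppear_eq (zs : List Int) : pvFirstAppear zs = zs.foldl pvAddUnique [] := rfl

-- ===== VERDICT (by name: the statement is the Claim_ definition above) =====
theorem box_index_finder_spec : Claim_equal_box_index_finder := by
  intro fun_l _ _
  show box_index_finder fun_l = box_index_finder_alt fun_l
  simp only [box_index_finder, box_index_finder_alt, pvLoopA_eq_expand,
    pvExtendA_eq_pvExtendB, pvFirstAppear_eq]
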